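-- pv_equiv track=rewrite | github.com/weightsforfun/forCodingTest | programmers/pratice1.py | solution
-- ===== SOURCE A (Python) =====
-- def solution(k, m, score):
--     answer = 0
--     score.sort()
--     for i in range(len(score)//m):
--         for j in range(m):
--             min_item=score.pop()
--         answer+=(min_item*m)
--     return answer
-- ===== SOURCE B (Python) =====
-- def solution(k, m, score):
--     s = sorted(score)
--     n = len(s)
--     return m * sum(s[n - (i + 1) * m] for i in range(n // m))
-- ===== Notes on version B (the rewrite author's own statement) =====
-- stated objective: simpler
-- what changed: Replaces A's nested pop-loop (pop m items per group, keep the last popped as the group minimum) by a single indexed pass over a sorted copy: each group's minimum sits at s[n-(i+1)*m], so the answer is m * sum of those n//m entries; A mutates the argument (sort + pops) while B leaves it untouched, and Pre_ excludes only m = 0 where A raises ZeroDivisionError.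
import Mathlib
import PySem

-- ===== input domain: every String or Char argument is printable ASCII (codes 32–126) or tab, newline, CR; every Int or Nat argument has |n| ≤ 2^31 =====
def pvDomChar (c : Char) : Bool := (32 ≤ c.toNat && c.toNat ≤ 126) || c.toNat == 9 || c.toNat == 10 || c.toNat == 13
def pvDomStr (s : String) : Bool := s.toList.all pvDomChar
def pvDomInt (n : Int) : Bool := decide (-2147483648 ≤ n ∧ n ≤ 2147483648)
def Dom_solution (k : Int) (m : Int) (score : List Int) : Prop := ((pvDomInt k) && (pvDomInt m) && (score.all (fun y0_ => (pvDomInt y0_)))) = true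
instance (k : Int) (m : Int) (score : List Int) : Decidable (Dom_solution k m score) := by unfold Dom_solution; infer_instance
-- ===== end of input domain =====

-- B replaces A's nested pop-loop by a single indexed pass over a sorted copy (simpler).
-- A MUTATES its argument (in-place sort + pops) while B does not; the equivalence proved
-- here is about the RETURN value only.

-- ===== PORT A =====
def solution (k : Int) (m : Int) (score : List Int) : Int :=
  -- answer = 0; score.sort(); for i in range(len(score)//m): for j in range(m): min_item = score.pop(); answer += min_item*m
  let s := PySem.List.sorted score (fun x => x)
  ((PySem.List.pyRange 0 (PySem.Int.floordiv (PySem.List.len s) m)).foldl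
    (fun (st : Int × List Int × Int) _ =>
      let inner := (PySem.List.pyRange 0 m).foldl
        (fun (p : List Int × Int) _ =>
          match PySem.List.pop? p.1 with
          | some (x, rest) => (rest, x)
          | none => p)          -- unreachable under Pre_: pops never outrun the list
        (st.2.1, st.2.2)
      (st.1 + inner.2 * m, inner.1, inner.2))
    ((0 : Int), s, (0 : Int))).1

-- ===== PORT B =====
def solution_alt (k : Int) (m : Int) (score : List Int) : Int :=
  -- s = sorted(score); n = len(s); return m * sum(s[n-(i+1)*m] for i in range(n // m))
  let s := PySem.List.sorted score (fun x => x)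
  let n := PySem.List.len s
  m * ((PySem.List.pyRange 0 (PySem.Int.floordiv n m)).map
        (fun i => PySem.List.pyGetD s (n - (i + 1) * m) 0)).sum

-- ===== PRECONDITION & SPEC =====
-- Pre_ excludes exactly m = 0, where both Pythons raise ZeroDivisionError at n // m.
def Pre_solution (k : Int) (m : Int) (score : List Int) : Prop := m ≠ 0
instance (k : Int) (m : Int) (score : List Int) : Decidable (Pre_solution k m score) := by unfold Pre_solution; infer_instance
def pvWitness_solution : Int × Int × List Int := (4, 2, [1, 2, 3, 4, 5])

def Spec_solution (k : Int) (m : Int) (score : List Int) (out : Int) : Prop := out = solution_alt k m score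
instance (k : Int) (m : Int) (score : List Int) (out : Int) : Decidable (Spec_solution k m score out) := by unfold Spec_solution; infer_instance

-- ===== CLAIM (what is proved, stated in full; the proofs are below) =====
def Claim_equal_solution : Prop := ∀ (k : Int) (m : Int) (score : List Int), Dom_solution k m score → Pre_solution k m score → Spec_solution k m score (solution k m score)

-- ===== LEMMAS AND PROOFS =====

-- A's inner loop: pop t items off the end; the list loses its last t elements and
-- min_item ends as the element at index len - t (for t ≥ 1).
lemma inner_spec (t : Nat) : ∀ (lst : List Int) (d : Int), t ≤ lst.length →
    (PySem.List.pyRange 0 (t : Int)).foldl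
      (fun (p : List Int × Int) _ =>
        match PySem.List.pop? p.1 with
        | some (x, rest) => (rest, x)
        | none => p) (lst, d)
    = (lst.take (lst.length - t),
       if t = 0 then d else lst.getD (lst.length - t) 0) := by
  induction t with
  | zero =>
    intro lst d _
    simp [PySem.List.pyRange_one_eq_nil (by omega : (0:Int) ≤ 0)]
  | succ t ih =>
    intro lst d h
    have hsplit : PySem.List.pyRange 0 ((t : Int) + 1)
        = PySem.List.pyRange 0 (t : Int) ++ [(t : Int)] :=
      PySem.List.pyRange_one_succ_right (by positivity)
    have hcast : ((t + 1 : Nat) : Int) = (t : Int) + 1 := by push_cast; ring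
    rw [hcast, hsplit, List.foldl_append, ih lst d (by omega)]
    have hlt : lst.length - (t + 1) < lst.length := by omega
    have htake : lst.take (lst.length - t)
        = lst.take (lst.length - (t + 1)) ++ [lst[lst.length - (t + 1)]] := by
      have : lst.length - t = (lst.length - (t + 1)) + 1 := by omega
      rw [this, List.take_succ, List.getElem?_eq_getElem hlt]
      simp
    simp only [List.foldl_cons, List.foldl_nil, htake, PySem.List.pop?_last]
    rw [if_neg (Nat.succ_ne_zero t), List.getD_eq_getElem _ _ hlt]

-- A's outer loop, g groups in, on a fixed sorted list s: the answer component equals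
-- B's partial sum times m, and the list component is s with the top g·M elements gone.
lemma outer_spec (m : Int) (M : Nat) (hm : m = (M : Int)) (hM : 1 ≤ M)
    (s : List Int) (g : Nat) (a d : Int) (h : g * M ≤ s.length) :
    ((PySem.List.pyRange 0 (g : Int)).foldl
      (fun (st : Int × List Int × Int) _ =>
        let inner := (PySem.List.pyRange 0 m).foldl
          (fun (p : List Int × Int) _ =>
            match PySem.List.pop? p.1 with
            | some (x, rest) => (rest, x)
            | none => p)
          (st.2.1, st.2.2)
        (st.1 + inner.2 * m, inner.1, inner.2))
      (a, s, d)).1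
      = a + ((PySem.List.pyRange 0 (g : Int)).map
              (fun i => PySem.List.pyGetD s ((s.length : Int) - (i + 1) * m) 0)).sum * m
    ∧ ((PySem.List.pyRange 0 (g : Int)).foldl
      (fun (st : Int × List Int × Int) _ =>
        let inner := (PySem.List.pyRange 0 m).foldl
          (fun (p : List Int × Int) _ =>
            match PySem.List.pop? p.1 with
            | some (x, rest) => (rest, x)
            | none => p)
          (st.2.1, st.2.2)
        (st.1 + inner.2 * m, inner.1, inner.2))
      (a, s, d)).2.1 = s.take (s.length - g * M) := by
  induction g with
  | zero =>
    simp [PySem.List.pyRange_one_eq_nil (by omega : (0:Int) ≤ 0)]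
  | succ g ih =>
    have hgm : (g + 1) * M = g * M + M := Nat.succ_mul g M
    have hg : g * M ≤ s.length := by omega
    obtain ⟨ih1, ih2⟩ := ih hg
    have hsplit : PySem.List.pyRange 0 ((g : Int) + 1)
        = PySem.List.pyRange 0 (g : Int) ++ [(g : Int)] :=
      PySem.List.pyRange_one_succ_right (by positivity)
    have hcast : ((g + 1 : Nat) : Int) = (g : Int) + 1 := by push_cast; ring
    rw [hcast, hsplit, List.foldl_append, List.map_append, List.foldl_cons, List.foldl_nil]
    -- the one extra step, starting from the state the IH describes
    set F := (PySem.List.pyRange 0 (g : Int)).foldl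
      (fun (st : Int × List Int × Int) _ =>
        let inner := (PySem.List.pyRange 0 m).foldl
          (fun (p : List Int × Int) _ =>
            match PySem.List.pop? p.1 with
            | some (x, rest) => (rest, x)
            | none => p)
          (st.2.1, st.2.2)
        (st.1 + inner.2 * m, inner.1, inner.2))
      (a, s, d) with hF
    have hlen : (s.take (s.length - g * M)).length = s.length - g * M := by
      rw [List.length_take]; omega
    have hMle : M ≤ (s.take (s.length - g * M)).length := by rw [hlen]; omega
    have hi := inner_spec M (s.take (s.length - g * M)) F.2.2 hMle
    rw [← hm] at hi
    rw [ih2, hi]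
    have hM0 : M ≠ 0 := by omega
    simp only [hM0, if_false, hlen]
    have hidx : s.length - g * M - M = s.length - (g + 1) * M := by omega
    have hidxlt : s.length - (g + 1) * M < s.length := by omega
    have hgetD : (s.take (s.length - g * M)).getD (s.length - g * M - M) 0
        = s.getD (s.length - (g + 1) * M) 0 := by
      rw [hidx, List.getD_eq_getElem _ _ (by rw [hlen]; omega),
          List.getD_eq_getElem _ _ hidxlt]
      exact List.getElem_take
    have hpyGetD : PySem.List.pyGetD s ((s.length : Int) - ((g : Int) + 1) * m) 0
        = s.getD (s.length - (g + 1) * M) 0 := by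
      have hcast2 : ((g : Int) + 1) * m = (((g + 1) * M : Nat) : Int) := by
        rw [hm]; push_cast; ring
      rw [PySem.List.pyGetD_of_nonneg s 0 (by rw [hcast2]; omega)]
      congr 1
      rw [hcast2]; omega
    constructor
    · simp only [ih1, hgetD, List.sum_append, List.map_cons, List.map_nil,
        List.sum_cons, List.sum_nil, add_zero, hpyGetD]
      ring
    · rw [List.take_take]
      congr 1
      omega

-- with m < 0, n // m ≤ 0 for n ≥ 0 (both loops are empty)
lemma floordiv_nonpos (n m : Int) (hn : 0 ≤ n) (hm : m < 0) :
    PySem.Int.floordiv n m ≤ 0 := by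
  have hmod := PySem.Int.mod_neg_bounds (a := n) hm
  have heq := PySem.Int.floordiv_mul_add_mod n m
  nlinarith [heq, hmod.1, hmod.2]

-- ===== VERDICT (by name: the statement is the Claim_ definition above) =====
theorem solution_spec : Claim_equal_solution := by
  intro k m score _ hpre
  unfold Spec_solution solution solution_alt
  set s := PySem.List.sorted score (fun x => x) with hs
  simp only [PySem.List.len_eq]
  rcases lt_trichotomy m 0 with hneg | hzero | hpos
  · -- m < 0: g ≤ 0, both loops empty, both return 0
    have hg : PySem.Int.floordiv (s.length : Int) m ≤ 0 :=
      floordiv_nonpos _ _ (by positivity) hneg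
    rw [PySem.List.pyRange_one_eq_nil hg]
    simp
  · exact absurd hzero hpre
  · -- m > 0
    set M := m.toNat with hMdef
    have hm : m = (M : Int) := by omega
    have hM : 1 ≤ M := by omega
    set gI := PySem.Int.floordiv (s.length : Int) m with hgI
    have hgnn : 0 ≤ gI := by
      rw [hgI, PySem.Int.floordiv_eq_ediv_of_pos hpos]
      exact Int.ediv_nonneg (by positivity) (le_of_lt hpos)
    set G := gI.toNat with hGdef
    have hGI : gI = (G : Int) := by omega
    have hbound : G * M ≤ s.length := by
      have h1 : gI * m ≤ (s.length : Int) := by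
        rw [hgI, PySem.Int.floordiv_eq_ediv_of_pos hpos]
        exact Int.ediv_mul_le _ (ne_of_gt hpos)
      rw [hGI, hm] at h1
      exact_mod_cast h1
    have := outer_spec m M hm hM s G 0 0 hbound
    rw [hGI, this.1]
    ring
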